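-- pv_equiv track=rewrite | github.com/gyang274/leetcode | src/1600-1699/1649.sort.through.instructions.py | createSortedArray
-- ===== SOURCE A (Python) =====
-- from typing import List
-- from operator import __add__
--
-- class SegmentTree:
--
--   def __init__(self, nums, update, query):
--     self.n = len(nums)
--     self.tree = [None] * self.n + nums
--     for i in range(self.n - 1, 0, -1):
--       self.tree[i] = query(self.tree[2 * i], self.tree[2 * i + 1])
--     self._update = update
--     self._query = query
--
--   def update(self, i: int, val: int) -> None:
--     k = self.n + i
--     while k > 0:
--       self.tree[k] = self._update(self.tree[k], val)
--       k //= 2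
--     return None
--
--   def query(self, i: int, j: int) -> int:
--     l, r, val = self.n + i, self.n + j, None
--     while l <= r:
--       # l move up along tree
--       if l % 2 == 0:
--         # if left is left child, the parent will include only inside boundary,
--         # so simply move up, and parent and later sum will include what's here
--         l //= 2
--       else:
--         # if left is the right child, then parent will include outside boundary,
--         # so add itself, and move right one step (become next parent's left child) and then move up
--         val = self.tree[l] if not val else self._query(val, self.tree[l])
--         l = (l + 1) // 2
--       # r move up along tree
--       if r % 2 == 1:
--         # if right is right child, the parent will include only inside boundary,
--         # so simply move up, and parent and later sum will include what's here
--         r //= 2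
--       else:
--         # if right is the left child, then parent will include outside boundary,
--         # so add itself, and move left one step (become next parent's right child) and then move up
--         val = self.tree[r] if not val else self._query(val, self.tree[r])
--         r = (r - 1) // 2
--     return val
--
-- def createSortedArray(instructions: List[int]) -> int:
--   # segment tree, TC: O(NlogM), SC: O(M), where N = len(A), M = max(A)
--   m = max(instructions)
--   v = SegmentTree([0] * (m + 2), __add__, __add__)
--   s = 0
--   for i, x in enumerate(instructions):
--     s += min(v.query(0, x - 1), i - v.query(0, x))
--     v.update(x, 1)
--   return s % (10 ** 9 + 7)
-- ===== SOURCE B (Python) =====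
-- def createSortedArray(instructions):
--     # flat counting array over the value range; cost(x) = min(#smaller, #larger) among
--     # the elements already placed, accumulated exactly, modulo taken once at the end
--     m = max(instructions)
--     cnt = [0] * (m + 1)
--     total = 0
--     for i, x in enumerate(instructions):
--         less = sum(cnt[:x])
--         greater = i - less - cnt[x]
--         total += min(less, greater)
--         cnt[x] += 1
--     return total % (10 ** 9 + 7)
-- ===== Notes on version B (the rewrite author's own statement) =====
-- stated objective: simpler
-- what changed: Replaces the generic segment-tree class (build, log-time update/query loops over a 2n-array) by a flat per-value count array updated in place and read with plain prefix slice sums.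
-- outside the precondition, e.g. on createSortedArray([]): A raises ValueError, B raises ValueError; on createSortedArray([3, 0]): A raises TypeError, B returns 0
import Mathlib
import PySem

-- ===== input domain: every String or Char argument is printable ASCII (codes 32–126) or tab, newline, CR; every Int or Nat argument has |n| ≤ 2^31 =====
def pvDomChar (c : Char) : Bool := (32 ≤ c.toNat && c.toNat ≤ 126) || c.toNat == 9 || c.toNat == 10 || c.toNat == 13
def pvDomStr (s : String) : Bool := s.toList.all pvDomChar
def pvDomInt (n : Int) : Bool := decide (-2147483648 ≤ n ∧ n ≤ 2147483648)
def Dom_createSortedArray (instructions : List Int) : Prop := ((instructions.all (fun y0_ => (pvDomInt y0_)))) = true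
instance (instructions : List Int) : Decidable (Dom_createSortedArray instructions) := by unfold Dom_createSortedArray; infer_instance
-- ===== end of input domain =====

-- ===== PORT A =====
-- B replaces A's generic segment-tree class by a flat per-value count array read with prefix slice sums (simpler, not faster).

-- ===== PORT A =====

-- `__add__` applied to tree entries; `none` marks Python's `None` (adding to it would raise)
def pvOptAdd (a b : Option Int) : Option Int :=
  match a, b with
  | some x, some y => some (x + y)
  | _, _ => none

-- Python truthiness of `val` (None or int) as used in `not val`
def pvFalsy (v : Option Int) : Bool :=
  match v with
  | none => true
  | some x => x == 0

-- `for i in range(self.n - 1, 0, -1): self.tree[i] = query(tree[2i], tree[2i+1])`, processing i, i-1, …, 1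
def pvSegInit (t : List (Option Int)) : Nat → List (Option Int)
  | 0 => t
  | i + 1 =>
    pvSegInit (t.set (i + 1) (pvOptAdd (t.getD (2 * (i + 1)) none) (t.getD (2 * (i + 1) + 1) none))) i

-- `update`: k = n + i; while k > 0: tree[k] = tree[k] + val; k //= 2
def pvSegUpdate (t : List (Option Int)) (k : Int) (v : Int) : List (Option Int) :=
  if h : 0 < k then
    pvSegUpdate (t.set k.toNat (pvOptAdd (t.getD k.toNat none) (some v))) (PySem.Int.floordiv k 2) v
  else t
termination_by k.toNat
decreasing_by
  rw [PySem.Int.floordiv_eq_ediv_of_pos (by omega : (0:Int) < 2)]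
  omega

-- `self.tree[l] if not val else self._query(val, self.tree[l])`
def pvAbsorb (t : List (Option Int)) (val : Option Int) (k : Int) : Option Int :=
  if pvFalsy val then t.getD k.toNat none else pvOptAdd val (t.getD k.toNat none)

-- the new l after one iteration (l//2 if even, (l+1)//2 if odd)
def pvStepL (l : Int) : Int :=
  if PySem.Int.mod l 2 == 0 then PySem.Int.floordiv l 2 else PySem.Int.floordiv (l + 1) 2

-- the new r after one iteration (r//2 if odd, (r-1)//2 if even)
def pvStepR (r : Int) : Int :=
  if PySem.Int.mod r 2 == 1 then PySem.Int.floordiv r 2 else PySem.Int.floordiv (r - 1) 2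

theorem pvStepL_eq (l : Int) : pvStepL l = PySem.Int.floordiv (l + 1) 2 := by
  unfold pvStepL
  rw [PySem.Int.floordiv_eq_ediv_of_pos (by omega : (0:Int) < 2),
      PySem.Int.floordiv_eq_ediv_of_pos (by omega : (0:Int) < 2),
      PySem.Int.mod_eq_emod_of_pos (by omega : (0:Int) < 2)]
  split <;> rename_i h <;> simp_all <;> omega

theorem pvStepR_eq (r : Int) : pvStepR r = PySem.Int.floordiv (r - 1) 2 := by
  unfold pvStepR
  rw [PySem.Int.floordiv_eq_ediv_of_pos (by omega : (0:Int) < 2),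
      PySem.Int.floordiv_eq_ediv_of_pos (by omega : (0:Int) < 2),
      PySem.Int.mod_eq_emod_of_pos (by omega : (0:Int) < 2)]
  split <;> rename_i h <;> simp_all <;> omega

-- `query`: the while l <= r loop; val threaded through the l-branch then the r-branch
def pvSegQuery (t : List (Option Int)) (l r : Int) (val : Option Int) : Option Int :=
  if h : l ≤ r then
    let val1 := if PySem.Int.mod l 2 == 0 then val else pvAbsorb t val l
    let val2 := if PySem.Int.mod r 2 == 1 then val1 else pvAbsorb t val1 r
    pvSegQuery t (pvStepL l) (pvStepR r) val2
  else val
termination_by (r - l + 1).toNat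
decreasing_by
  rw [pvStepL_eq, pvStepR_eq,
      PySem.Int.floordiv_eq_ediv_of_pos (by omega : (0:Int) < 2),
      PySem.Int.floordiv_eq_ediv_of_pos (by omega : (0:Int) < 2)]
  omega

def createSortedArray (instructions : List Int) : Int :=
  match PySem.List.max? instructions (fun x => x) with
  | none => 0  -- unreachable: max([]) raises ValueError (excluded by Pre_)
  | some m =>
    let nn : Nat := (m + 2).toNat          -- self.n = len([0] * (m + 2))
    let tree0 : List (Option Int) := List.replicate nn none ++ List.replicate nn (some 0)
    let tree1 := pvSegInit tree0 (nn - 1)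
    let res := (PySem.List.enumerate instructions 0).foldl
      (fun (st : List (Option Int) × Int) p =>
        let q1 := pvSegQuery st.1 (nn : Int) ((nn : Int) + p.2 - 1) none
        let q2 := pvSegQuery st.1 (nn : Int) ((nn : Int) + p.2) none
        -- min(None, _) raises: inputs making a query return none are outside Pre_
        (pvSegUpdate st.1 ((nn : Int) + p.2) 1, st.2 + min (q1.getD 0) (p.1 - q2.getD 0)))
      (tree1, 0)
    PySem.Int.mod res.2 (10 ^ 9 + 7)

-- ===== PORT B =====

def createSortedArray_alt (instructions : List Int) : Int :=
  match PySem.List.max? instructions (fun x => x) with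
  | none => 0  -- unreachable: max([]) raises ValueError (excluded by Pre_)
  | some m =>
    let cnt0 : List Int := List.replicate (m + 1).toNat 0
    let res := (PySem.List.enumerate instructions 0).foldl
      (fun (st : List Int × Int) p =>
        let less := (PySem.List.slice st.1 none (some p.2)).sum
        let greater := p.1 - less - PySem.List.pyGetD st.1 p.2 0
        -- cnt[x] += 1 via List.set: exact for 0 ≤ x < len(cnt), which Pre_ guarantees
        (st.1.set p.2.toNat (PySem.List.pyGetD st.1 p.2 0 + 1), st.2 + min less greater))
      (cnt0, 0)
    PySem.Int.mod res.2 (10 ^ 9 + 7)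


-- ===== PRECONDITION & SPEC =====

-- Pre_ is exactly where A returns: on [] max() raises ValueError, and with any element ≤ 0
-- the query for that element returns None and min(None, int) raises TypeError.
def Pre_createSortedArray (instructions : List Int) : Prop :=
  instructions ≠ [] ∧ ∀ x ∈ instructions, 1 ≤ x
instance (instructions : List Int) : Decidable (Pre_createSortedArray instructions) := by
  unfold Pre_createSortedArray; infer_instance

def pvWitness_createSortedArray : List Int := [3, 1, 2, 1]

def Spec_createSortedArray (instructions : List Int) (out : Int) : Prop :=
  out = createSortedArray_alt instructions
instance (instructions : List Int) (out : Int) : Decidable (Spec_createSortedArray instructions out) := by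
  unfold Spec_createSortedArray; infer_instance

-- ===== CLAIM (what is proved, stated in full; the proofs are below) =====
def Claim_equal_createSortedArray : Prop := ∀ (instructions : List Int), Dom_createSortedArray instructions → Pre_createSortedArray instructions → Spec_createSortedArray instructions (createSortedArray instructions)

-- ===== LEMMAS AND PROOFS =====

def gv (t : List (Option Int)) (k : Nat) : Int := (t.getD k none).getD 0
def sumG (t : List (Option Int)) (a b : Nat) : Int :=
  if _ : a ≤ b then gv t a + sumG t (a + 1) b else 0
termination_by b + 1 - a

theorem sumG_nil (t : List (Option Int)) (a b : Nat) (h : b < a) : sumG t a b = 0 := by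
  unfold sumG; simp [Nat.not_le.mpr h]

theorem sumG_succ_top (t : List (Option Int)) (a b : Nat) (h : a ≤ b + 1) :
    sumG t a (b + 1) = sumG t a b + gv t (b + 1) := by
  induction n : b + 1 - a generalizing a with
  | zero =>
    have ha : a = b + 1 := by omega
    subst ha
    rw [sumG, dif_pos h, sumG_nil t (b + 1 + 1) (b + 1) (by omega),
        sumG_nil t (b + 1) b (by omega)]
    ring
  | succ n ih =>
    have ha : a ≤ b := by omega
    have e1 : sumG t a (b + 1) = gv t a + sumG t (a + 1) (b + 1) := by
      rw [sumG, dif_pos (by omega : a ≤ b + 1)]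
    have e2 : sumG t a b = gv t a + sumG t (a + 1) b := by
      rw [sumG, dif_pos ha]
    rw [e1, e2, ih (a + 1) (by omega) (by omega)]
    ring

theorem sumG_pair (t : List (Option Int)) (nn : Nat)
    (hrec : ∀ p : Nat, 1 ≤ p → p < nn → gv t p = gv t (2 * p) + gv t (2 * p + 1)) :
    ∀ hi lo : Nat, 2 ≤ lo → lo % 2 = 0 → hi % 2 = 1 → hi < 2 * nn →
      sumG t (lo / 2) (hi / 2) = sumG t lo hi := by
  intro hi
  induction hi using Nat.strong_induction_on with
  | _ hi ih =>
    intro lo h2 hloe hhio hhi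
    by_cases hcmp : hi < lo
    · rw [sumG_nil t lo hi hcmp, sumG_nil t (lo / 2) (hi / 2) (by omega)]
    · have hge : lo ≤ hi := by omega
      have h3 : 3 ≤ hi := by omega
      have e1 : hi - 2 + 1 = hi - 1 := by omega
      have e2 : hi - 1 + 1 = hi := by omega
      have r1 : sumG t lo hi = sumG t lo (hi - 1) + gv t hi := by
        rw [← e2, sumG_succ_top t lo (hi - 1) (by omega), e2]
      have r2 : sumG t lo (hi - 1) = sumG t lo (hi - 2) + gv t (hi - 1) := by
        rw [← e1, sumG_succ_top t lo (hi - 2) (by omega), e1]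
      have l1 : hi / 2 - 1 + 1 = hi / 2 := by omega
      have r3 : sumG t (lo / 2) (hi / 2) = sumG t (lo / 2) (hi / 2 - 1) + gv t (hi / 2) := by
        rw [← l1, sumG_succ_top t (lo / 2) (hi / 2 - 1) (by omega), l1]
      have ihx := ih (hi - 2) (by omega) lo h2 hloe (by omega) (by omega)
      have hx : (hi - 2) / 2 = hi / 2 - 1 := by omega
      have hp := hrec (hi / 2) (by omega) (by omega)
      have hc1 : 2 * (hi / 2) = hi - 1 := by omega
      have hc2 : 2 * (hi / 2) + 1 = hi := by omega
      rw [r3, r1, r2, ← hx, ihx, hp, hc1, e2]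
      ring

theorem pvAbsorb_eq (t : List (Option Int)) (val : Option Int) (k : Int) (g : Int)
    (hsome : t.getD k.toNat none = some g) :
    pvAbsorb t val k = some (val.getD 0 + g) := by
  unfold pvAbsorb pvFalsy pvOptAdd
  rw [hsome]
  match val with
  | none => simp
  | some c =>
    by_cases hc : c = 0
    · subst hc; simp
    · simp [hc]

theorem pvSegQuery_eq (t : List (Option Int)) (nn : Nat)
    (hs : ∀ k : Nat, 1 ≤ k → k < 2 * nn → t.getD k none = some (gv t k))
    (hrec : ∀ p : Nat, 1 ≤ p → p < nn → gv t p = gv t (2 * p) + gv t (2 * p + 1)) :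
    ∀ n : Nat, ∀ l r : Int, ∀ val : Option Int,
      (r - l + 1).toNat ≤ n → 1 ≤ l → l ≤ r → r < 2 * nn →
      pvSegQuery t l r val = some (val.getD 0 + sumG t l.toNat r.toNat) := by
  intro n
  induction n with
  | zero => intro l r val hm h1 hlr hr; omega
  | succ n ih =>
    intro l r val hm h1 hlr hr
    rw [pvSegQuery, dif_pos hlr]
    have hL1 : 1 ≤ l.toNat := by omega
    have hLR : l.toNat ≤ r.toNat := by omega
    have hR : r.toNat < 2 * nn := by omega
    have hsl := hs l.toNat (by omega) (by omega)
    have hsr := hs r.toNat (by omega) (by omega)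
    have hstepl : (pvStepL l).toNat = (l.toNat + 1) / 2 := by
      rw [pvStepL_eq, PySem.Int.floordiv_eq_ediv_of_pos (by omega : (0:Int) < 2)]; omega
    have hstepr : (pvStepR r).toNat = (r.toNat - 1) / 2 := by
      rw [pvStepR_eq, PySem.Int.floordiv_eq_ediv_of_pos (by omega : (0:Int) < 2)]; omega
    have hstepl1 : (1:Int) ≤ pvStepL l := by
      rw [pvStepL_eq, PySem.Int.floordiv_eq_ediv_of_pos (by omega : (0:Int) < 2)]; omega
    have hsteprlt : pvStepR r < 2 * nn := by
      rw [pvStepR_eq, PySem.Int.floordiv_eq_ediv_of_pos (by omega : (0:Int) < 2)]; omega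
    have hml := PySem.Int.mod_eq_emod_of_pos (b := 2) (a := l) (by omega)
    have hmr := PySem.Int.mod_eq_emod_of_pos (b := 2) (a := r) (by omega)
    have hplE : pvStepL l = (l + 1) / 2 := by
      rw [pvStepL_eq, PySem.Int.floordiv_eq_ediv_of_pos (by omega : (0:Int) < 2)]
    have hprE : pvStepR r = (r - 1) / 2 := by
      rw [pvStepR_eq, PySem.Int.floordiv_eq_ediv_of_pos (by omega : (0:Int) < 2)]
    have hmeas : (pvStepR r - pvStepL l + 1).toNat ≤ n := by rw [hplE, hprE]; omega
    rcases PySem.Int.mod_two_eq l with hl | hl <;> rcases PySem.Int.mod_two_eq r with hr2 | hr2 <;>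
      simp only [hl, hr2] <;> norm_num
    · -- l even, r even : absorb r
      have hLp : l.toNat % 2 = 0 := by omega
      have hRp : r.toNat % 2 = 0 := by omega
      rw [pvAbsorb_eq t val r _ hsr]
      by_cases hc : pvStepL l ≤ pvStepR r
      · rw [ih _ _ _ hmeas hstepl1 hc hsteprlt, hstepl, hstepr]
        have hL2 : (l.toNat + 1) / 2 = l.toNat / 2 := by omega
        have hRR : r.toNat - 1 + 1 = r.toNat := by omega
        have e1 : sumG t l.toNat r.toNat = sumG t l.toNat (r.toNat - 1) + gv t r.toNat := by
          rw [← hRR, sumG_succ_top t l.toNat (r.toNat - 1) (by omega), hRR]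
        have e2 := sumG_pair t nn hrec (r.toNat - 1) l.toNat (by omega) hLp (by omega) (by omega)
        rw [hL2, e2, e1]
        simp only [Option.getD_some]; ring_nf
      · rw [pvSegQuery, dif_neg hc]
        have hEq : l.toNat = r.toNat := by rw [hplE, hprE] at hc; omega
        have e1 : sumG t l.toNat r.toNat = gv t r.toNat := by
          rw [sumG, dif_pos hLR, hEq, sumG_nil t (r.toNat + 1) r.toNat (by omega)]; ring
        rw [e1]
    · -- l even, r odd : no absorption, loop continues
      have hLp : l.toNat % 2 = 0 := by omega
      have hRp : r.toNat % 2 = 1 := by omega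
      have hc : pvStepL l ≤ pvStepR r := by rw [hplE, hprE]; omega
      rw [ih _ _ _ hmeas hstepl1 hc hsteprlt, hstepl, hstepr]
      have hL2 : (l.toNat + 1) / 2 = l.toNat / 2 := by omega
      have hR2 : (r.toNat - 1) / 2 = r.toNat / 2 := by omega
      have e2 := sumG_pair t nn hrec r.toNat l.toNat (by omega) hLp hRp (by omega)
      rw [hL2, hR2, e2]
    · -- l odd, r even : absorb l then r
      have hLp : l.toNat % 2 = 1 := by omega
      have hRp : r.toNat % 2 = 0 := by omega
      rw [pvAbsorb_eq t val l _ hsl, pvAbsorb_eq t _ r _ hsr]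
      by_cases hc : pvStepL l ≤ pvStepR r
      · rw [ih _ _ _ hmeas hstepl1 hc hsteprlt, hstepl, hstepr]
        have hRR : r.toNat - 1 + 1 = r.toNat := by omega
        have e0 : sumG t l.toNat r.toNat = gv t l.toNat + sumG t (l.toNat + 1) r.toNat := by
          rw [sumG, dif_pos hLR]
        have e1 : sumG t (l.toNat + 1) r.toNat
            = sumG t (l.toNat + 1) (r.toNat - 1) + gv t r.toNat := by
          rw [← hRR, sumG_succ_top t (l.toNat + 1) (r.toNat - 1) (by omega), hRR]
        have e2 := sumG_pair t nn hrec (r.toNat - 1) (l.toNat + 1) (by omega) (by omega)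
          (by omega) (by omega)
        rw [e0, e1, e2]
        simp only [Option.getD_some]; ring_nf
      · rw [pvSegQuery, dif_neg hc]
        have hEq : r.toNat = l.toNat + 1 := by rw [hplE, hprE] at hc; omega
        have e1 : sumG t l.toNat r.toNat = gv t l.toNat + gv t r.toNat := by
          rw [sumG, dif_pos hLR, hEq, sumG, dif_pos (by omega : l.toNat + 1 ≤ l.toNat + 1),
              sumG_nil t (l.toNat + 1 + 1) (l.toNat + 1) (by omega)]
          ring
        rw [e1]
        simp only [Option.getD_some]; ring_nf
    · -- l odd, r odd : absorb l, loop continues or single element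
      have hLp : l.toNat % 2 = 1 := by omega
      have hRp : r.toNat % 2 = 1 := by omega
      rw [pvAbsorb_eq t val l _ hsl]
      by_cases hc : pvStepL l ≤ pvStepR r
      · rw [ih _ _ _ hmeas hstepl1 hc hsteprlt, hstepl, hstepr]
        have hR2 : (r.toNat - 1) / 2 = r.toNat / 2 := by omega
        have e0 : sumG t l.toNat r.toNat = gv t l.toNat + sumG t (l.toNat + 1) r.toNat := by
          rw [sumG, dif_pos hLR]
        have e2 := sumG_pair t nn hrec r.toNat (l.toNat + 1) (by omega) (by omega) hRp (by omega)
        rw [e0, hR2, e2]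
        simp only [Option.getD_some]; ring_nf
      · rw [pvSegQuery, dif_neg hc]
        have hEq : l.toNat = r.toNat := by rw [hplE, hprE] at hc; omega
        have e1 : sumG t l.toNat r.toNat = gv t l.toNat := by
          rw [sumG, dif_pos hLR, hEq, sumG_nil t (r.toNat + 1) r.toNat (by omega)]; ring
        rw [e1]

-- index idx lies on the halving chain k, k//2, k//4, …, 1
def pvOnPath (k idx : Int) : Bool :=
  if h : 0 < k then (idx == k || pvOnPath (PySem.Int.floordiv k 2) idx) else false
termination_by k.toNat
decreasing_by
  rw [PySem.Int.floordiv_eq_ediv_of_pos (by omega : (0:Int) < 2)]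
  omega

theorem getD_set (t : List (Option Int)) (i j : Nat) (v : Option Int) :
    (t.set i v).getD j none = if i = j ∧ i < t.length then v else t.getD j none := by
  simp only [List.getD_eq_getElem?_getD, List.getElem?_set]
  by_cases h : i = j
  · subst h
    by_cases hlen : i < t.length <;> simp [hlen]
  · simp [h]

theorem pvOnPath_le : ∀ n : Nat, ∀ k idx : Int, k.toNat ≤ n →
    pvOnPath k idx = true → 1 ≤ idx ∧ idx ≤ k := by
  intro n
  induction n with
  | zero =>
    intro k idx hn hp
    rw [pvOnPath] at hp
    have : ¬ (0 < k) := by omega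
    simp [this] at hp
  | succ n ih =>
    intro k idx hn hp
    rw [pvOnPath] at hp
    by_cases hk : 0 < k
    · rw [dif_pos hk] at hp
      rcases Bool.or_eq_true_iff.mp hp with h | h
      · have : idx = k := by simpa using h
        omega
      · have hd : (PySem.Int.floordiv k 2).toNat ≤ n := by
          rw [PySem.Int.floordiv_eq_ediv_of_pos (by omega : (0:Int) < 2)]; omega
        have := ih _ _ hd h
        have hdd : PySem.Int.floordiv k 2 ≤ k := by
          rw [PySem.Int.floordiv_eq_ediv_of_pos (by omega : (0:Int) < 2)]; omega
        omega
    · rw [dif_neg hk] at hp; exact absurd hp (by simp)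

theorem pvSegUpdate_length : ∀ n : Nat, ∀ t : List (Option Int), ∀ k v : Int, k.toNat ≤ n →
    (pvSegUpdate t k v).length = t.length := by
  intro n
  induction n with
  | zero =>
    intro t k v hn
    rw [pvSegUpdate]
    have : ¬ (0 < k) := by omega
    simp [this]
  | succ n ih =>
    intro t k v hn
    rw [pvSegUpdate]
    by_cases hk : 0 < k
    · rw [dif_pos hk]
      rw [ih _ _ _ (by rw [PySem.Int.floordiv_eq_ediv_of_pos (by omega : (0:Int) < 2)]; omega)]
      simp
    · rw [dif_neg hk]

theorem pvSegUpdate_getD : ∀ n : Nat, ∀ t : List (Option Int), ∀ k v : Int, ∀ idx : Nat,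
    k.toNat ≤ n → k < (t.length : Int) →
    (pvSegUpdate t k v).getD idx none =
      if pvOnPath k (idx : Int) then pvOptAdd (t.getD idx none) (some v) else t.getD idx none := by
  intro n
  induction n with
  | zero =>
    intro t k v idx hn hk
    rw [pvSegUpdate, pvOnPath]
    have : ¬ (0 < k) := by omega
    simp [this]
  | succ n ih =>
    intro t k v idx hn hk
    rw [pvSegUpdate, pvOnPath]
    by_cases hkpos : 0 < k
    · rw [dif_pos hkpos, dif_pos hkpos]
      have hfd : (PySem.Int.floordiv k 2).toNat ≤ n := by
        rw [PySem.Int.floordiv_eq_ediv_of_pos (by omega : (0:Int) < 2)]; omega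
      have hfdlt : PySem.Int.floordiv k 2 < ((t.set k.toNat (pvOptAdd (t.getD k.toNat none) (some v))).length : Int) := by
        simp only [List.length_set]
        rw [PySem.Int.floordiv_eq_ediv_of_pos (by omega : (0:Int) < 2)]; omega
      rw [ih _ _ v idx hfd hfdlt]
      by_cases hidx : (idx : Int) = k
      · have hop : pvOnPath (PySem.Int.floordiv k 2) (idx : Int) = false := by
          by_contra hc
          have hc2 := Bool.ne_false_iff.mp hc
          have := pvOnPath_le (PySem.Int.floordiv k 2).toNat _ _ le_rfl hc2
          rw [PySem.Int.floordiv_eq_ediv_of_pos (by omega : (0:Int) < 2)] at this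
          omega
        have hbeq : ((idx : Int) == k) = true := by simpa using hidx
        have hop2 : pvOnPath (k / 2) (idx : Int) = false := by
          rw [← PySem.Int.floordiv_eq_ediv_of_pos (by omega : (0:Int) < 2)]; exact hop
        have hset : k.toNat = idx := by omega
        have hlen : idx < t.length := by omega
        simp [hop2, hbeq, hset, hlen, List.getD_eq_getElem?_getD, List.getElem?_set]
      · have hbeq : ((idx : Int) == k) = false := by simpa using hidx
        have hne : k.toNat ≠ idx := by omega
        simp [hbeq, hne, List.getD_eq_getElem?_getD, List.getElem?_set]
    · rw [dif_neg hkpos, dif_neg hkpos]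
      simp

theorem pvOnPath_self (p : Int) (hp : 0 < p) : pvOnPath p p = true := by
  rw [pvOnPath]; simp [hp]

theorem pvOnPath_child : ∀ n : Nat, ∀ k p : Int, k.toNat ≤ n → 0 < p →
    (pvOnPath k (2 * p) = true ∨ pvOnPath k (2 * p + 1) = true) →
    pvOnPath k p = true := by
  intro n
  induction n with
  | zero =>
    intro k p hn hp h
    have hk0 : ¬ (0 < k) := by omega
    rcases h with h | h <;> rw [pvOnPath, dif_neg hk0] at h <;> exact absurd h (by simp)
  | succ n ih =>
    intro k p hn hp h
    have hk : 0 < k := by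
      by_contra hk
      rcases h with h | h <;> (rw [pvOnPath] at h; simp [hk] at h)
    have hfd : (PySem.Int.floordiv k 2).toNat ≤ n := by
      rw [PySem.Int.floordiv_eq_ediv_of_pos (by omega : (0:Int) < 2)]; omega
    rw [pvOnPath, dif_pos hk]
    rcases h with h | h <;> rw [pvOnPath, dif_pos hk] at h <;>
      rcases Bool.or_eq_true_iff.mp h with hh | hh
    · have hkp : 2 * p = k := by simpa using hh
      have : PySem.Int.floordiv k 2 = p := by
        rw [PySem.Int.floordiv_eq_ediv_of_pos (by omega : (0:Int) < 2)]; omega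
      rw [this]
      simp [pvOnPath_self p hp]
    · rw [ih _ p hfd hp (Or.inl hh)]; simp
    · have hkp : 2 * p + 1 = k := by simpa using hh
      have : PySem.Int.floordiv k 2 = p := by
        rw [PySem.Int.floordiv_eq_ediv_of_pos (by omega : (0:Int) < 2)]; omega
      rw [this]
      simp [pvOnPath_self p hp]
    · rw [ih _ p hfd hp (Or.inr hh)]; simp

theorem pvOnPath_parent : ∀ n : Nat, ∀ k p : Int, k.toNat ≤ n →
    pvOnPath k p = true → p < k →
    pvOnPath k (2 * p) = true ∨ pvOnPath k (2 * p + 1) = true := by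
  intro n
  induction n with
  | zero =>
    intro k p hn h hpk
    rw [pvOnPath] at h
    have hk0 : ¬ (0 < k) := by omega
    simp [hk0] at h
  | succ n ih =>
    intro k p hn h hpk
    have hk : 0 < k := by
      by_contra hk
      rw [pvOnPath] at h; simp [hk] at h
    rw [pvOnPath, dif_pos hk] at h
    rcases Bool.or_eq_true_iff.mp h with hh | hh
    · have : p = k := by simpa using hh
      omega
    · have hfd : (PySem.Int.floordiv k 2).toNat ≤ n := by
        rw [PySem.Int.floordiv_eq_ediv_of_pos (by omega : (0:Int) < 2)]; omega
      by_cases hp2 : p = PySem.Int.floordiv k 2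
      · have hk2 : k = 2 * p ∨ k = 2 * p + 1 := by
          rw [PySem.Int.floordiv_eq_ediv_of_pos (by omega : (0:Int) < 2)] at hp2; omega
        rcases hk2 with hk2 | hk2
        · left; rw [← hk2]; exact pvOnPath_self k hk
        · right; rw [← hk2]; exact pvOnPath_self k hk
      · have hple := pvOnPath_le (PySem.Int.floordiv k 2).toNat _ _ le_rfl hh
        rcases ih _ p hfd hh (by omega) with hc | hc
        · left; rw [pvOnPath, dif_pos hk, hc]; simp
        · right; rw [pvOnPath, dif_pos hk, hc]; simp

theorem pvOnPath_not_both : ∀ n : Nat, ∀ k p : Int, k.toNat ≤ n → 1 ≤ p →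
    pvOnPath k (2 * p + 1) = true → pvOnPath k (2 * p) = false := by
  intro n
  induction n with
  | zero =>
    intro k p hn hp h
    rw [pvOnPath] at h
    have hk0 : ¬ (0 < k) := by omega
    simp [hk0] at h
  | succ n ih =>
    intro k p hn hp h
    have hk : 0 < k := by
      by_contra hk
      rw [pvOnPath] at h; simp [hk] at h
    have hfd : (PySem.Int.floordiv k 2).toNat ≤ n := by
      rw [PySem.Int.floordiv_eq_ediv_of_pos (by omega : (0:Int) < 2)]; omega
    rw [pvOnPath, dif_pos hk] at h
    by_contra hc
    have hc2 := Bool.ne_false_iff.mp hc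
    rw [pvOnPath, dif_pos hk] at hc2
    rcases Bool.or_eq_true_iff.mp h with hh | hh <;>
      rcases Bool.or_eq_true_iff.mp hc2 with hg | hg
    · have h1 : 2 * p + 1 = k := by simpa using hh
      have h2 : 2 * p = k := by simpa using hg
      omega
    · have h1 : 2 * p + 1 = k := by simpa using hh
      have := pvOnPath_le (PySem.Int.floordiv k 2).toNat _ _ le_rfl hg
      rw [PySem.Int.floordiv_eq_ediv_of_pos (by omega : (0:Int) < 2)] at this
      omega
    · have h2 : 2 * p = k := by simpa using hg
      have := pvOnPath_le (PySem.Int.floordiv k 2).toNat _ _ le_rfl hh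
      rw [PySem.Int.floordiv_eq_ediv_of_pos (by omega : (0:Int) < 2)] at this
      omega
    · have := ih _ p hfd hp hh
      rw [this] at hg
      exact absurd hg (by simp)

def SegInv (nn : Nat) (t : List (Option Int)) (cm : Nat → Int) : Prop :=
  t.length = 2 * nn ∧
  (∀ k : Nat, 1 ≤ k → k < 2 * nn → t.getD k none = some (gv t k)) ∧
  (∀ p : Nat, 1 ≤ p → p < nn → gv t p = gv t (2 * p) + gv t (2 * p + 1)) ∧
  (∀ j : Nat, j < nn → gv t (nn + j) = cm j)

theorem pvOnPath_leaf (nn x j : Nat) (hx : x < nn) (hj : j < nn) :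
    pvOnPath ((nn : Int) + x) ((nn : Int) + j) = true ↔ j = x := by
  constructor
  · intro h
    rw [pvOnPath, dif_pos (by omega : (0:Int) < (nn : Int) + x)] at h
    rcases Bool.or_eq_true_iff.mp h with hh | hh
    · have : (nn : Int) + j = (nn : Int) + x := by simpa using hh
      omega
    · have := pvOnPath_le (PySem.Int.floordiv ((nn : Int) + x) 2).toNat _ _ le_rfl hh
      rw [PySem.Int.floordiv_eq_ediv_of_pos (by omega : (0:Int) < 2)] at this
      omega
  · intro h
    subst h
    exact pvOnPath_self _ (by omega)

theorem SegInv_update (nn : Nat) (t : List (Option Int)) (cm : Nat → Int) (x : Nat)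
    (hInv : SegInv nn t cm) (hx : x < nn) :
    SegInv nn (pvSegUpdate t ((nn : Int) + x) 1)
      (fun j => cm j + if j = x then 1 else 0) := by
  obtain ⟨hlen, hs, hrec, hleaf⟩ := hInv
  set k : Int := (nn : Int) + x with hkdef
  have hklen : k < (t.length : Int) := by rw [hlen]; omega
  have hPW : ∀ idx : Nat, (pvSegUpdate t k 1).getD idx none =
      if pvOnPath k (idx : Int) then pvOptAdd (t.getD idx none) (some 1) else t.getD idx none :=
    fun idx => pvSegUpdate_getD k.toNat t k 1 idx le_rfl hklen
  have hlen' : (pvSegUpdate t k 1).length = 2 * nn := by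
    rw [pvSegUpdate_length k.toNat t k 1 le_rfl, hlen]
  have hG : ∀ idx : Nat, 1 ≤ idx → idx < 2 * nn →
      gv (pvSegUpdate t k 1) idx = gv t idx + (if pvOnPath k (idx : Int) then 1 else 0) := by
    intro idx h1 h2
    unfold gv
    rw [hPW idx]
    by_cases hp : pvOnPath k (idx : Int)
    · rw [if_pos hp, if_pos hp, hs idx h1 h2]
      simp [pvOptAdd, gv]
    · rw [if_neg hp, if_neg hp]
      ring
  refine ⟨hlen', ?_, ?_, ?_⟩
  · intro q h1 h2
    rw [hPW q, hG q h1 h2]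
    by_cases hp : pvOnPath k (q : Int)
    · rw [if_pos hp, if_pos hp, hs q h1 h2]
      simp [pvOptAdd]
    · rw [if_neg hp, if_neg hp, hs q h1 h2]
      simp
  · intro p h1 h2
    have c1 : (1:Nat) ≤ 2 * p := by omega
    have c2 : 2 * p < 2 * nn := by omega
    have c3 : (1:Nat) ≤ 2 * p + 1 := by omega
    have c4 : 2 * p + 1 < 2 * nn := by omega
    rw [hG p h1 (by omega), hG (2 * p) c1 c2, hG (2 * p + 1) c3 c4, hrec p h1 h2]
    have hcast1 : ((2 * p : Nat) : Int) = 2 * (p : Int) := by push_cast; ring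
    have hcast2 : ((2 * p + 1 : Nat) : Int) = 2 * (p : Int) + 1 := by push_cast; ring
    rw [hcast1, hcast2]
    by_cases hp : pvOnPath k (p : Int)
    · have hplt : (p : Int) < k := by omega
      rcases pvOnPath_parent k.toNat k (p : Int) le_rfl hp hplt with hc | hc
      · have hnb : pvOnPath k (2 * (p : Int) + 1) = false := by
          by_contra hcc
          have hcc2 := Bool.ne_false_iff.mp hcc
          have := pvOnPath_not_both k.toNat k (p : Int) le_rfl (by omega) hcc2
          rw [this] at hc
          exact absurd hc (by simp)
        rw [if_pos hp, hc, hnb]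
        simp
        ring
      · have hnb := pvOnPath_not_both k.toNat k (p : Int) le_rfl (by omega) hc
        rw [if_pos hp, hc, hnb]
        simp
        ring
    · have hc1 : pvOnPath k (2 * (p : Int)) = false := by
        by_contra hcc
        have hcc2 := Bool.ne_false_iff.mp hcc
        have := pvOnPath_child k.toNat k (p : Int) le_rfl (by omega) (Or.inl hcc2)
        exact hp this
      have hc2 : pvOnPath k (2 * (p : Int) + 1) = false := by
        by_contra hcc
        have hcc2 := Bool.ne_false_iff.mp hcc
        have := pvOnPath_child k.toNat k (p : Int) le_rfl (by omega) (Or.inr hcc2)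
        exact hp this
      rw [if_neg hp, hc1, hc2]
      simp
  · intro j hj
    have hcast : ((nn + j : Nat) : Int) = (nn : Int) + j := by push_cast; ring
    rw [hG (nn + j) (by omega) (by omega), hleaf j hj, hcast]
    by_cases hjx : j = x
    · subst hjx
      rw [if_pos ((pvOnPath_leaf nn j j hx hj).mpr rfl)]
      simp
    · have hfa : pvOnPath k ((nn : Int) + j) = false := by
        by_contra hcc
        have hcc2 := Bool.ne_false_iff.mp hcc
        exact hjx ((pvOnPath_leaf nn x j hx hj).mp hcc2)
      rw [hfa]
      simp [hjx]

theorem pvSegInit_spec (nn : Nat) : ∀ i : Nat, ∀ t : List (Option Int),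
    t.length = 2 * nn → i < nn →
    (∀ k : Nat, i < k → k < 2 * nn → t.getD k none = some 0) →
    (pvSegInit t i).length = 2 * nn ∧
      (∀ k : Nat, 1 ≤ k → k < 2 * nn → (pvSegInit t i).getD k none = some 0) := by
  intro i
  induction i with
  | zero =>
    intro t hlen hi h
    exact ⟨hlen, fun k h1 h2 => h k (by omega) h2⟩
  | succ i ih =>
    intro t hlen hi h
    rw [pvSegInit]
    have hc1 : t.getD (2 * (i + 1)) none = some 0 := h _ (by omega) (by omega)
    have hc2 : t.getD (2 * (i + 1) + 1) none = some 0 := h _ (by omega) (by omega)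
    rw [hc1, hc2]
    apply ih
    · simp [hlen]
    · omega
    · intro k hk1 hk2
      rw [getD_set]
      by_cases hk : i + 1 = k
      · simp [hk, hlen, hk2, pvOptAdd]
      · rw [if_neg (by omega)]
        exact h k (by omega) hk2

theorem SegInv_init (nn : Nat) (h1 : 1 ≤ nn) :
    SegInv nn (pvSegInit (List.replicate nn none ++ List.replicate nn (some 0)) (nn - 1))
      (fun _ => 0) := by
  have hlen0 : (List.replicate nn (none : Option Int) ++ List.replicate nn (some 0)).length = 2 * nn := by
    simp; omega
  have hbase : ∀ k : Nat, nn - 1 < k → k < 2 * nn →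
      (List.replicate nn (none : Option Int) ++ List.replicate nn (some 0)).getD k none = some 0 := by
    intro k hk1 hk2
    have hkn : nn ≤ k := by omega
    rw [List.getD_eq_getElem?_getD, List.getElem?_append_right (by simpa using hkn)]
    simp only [List.length_replicate, List.getElem?_replicate]
    rw [if_pos (by omega)]
    rfl
  obtain ⟨hlen, hall⟩ := pvSegInit_spec nn (nn - 1)
    (List.replicate nn none ++ List.replicate nn (some 0)) hlen0 (by omega) hbase
  have hgv : ∀ k : Nat, 1 ≤ k → k < 2 * nn →
      gv (pvSegInit (List.replicate nn none ++ List.replicate nn (some 0)) (nn - 1)) k = 0 := by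
    intro k hk1 hk2
    unfold gv
    rw [hall k hk1 hk2]
    rfl
  refine ⟨hlen, ?_, ?_, ?_⟩
  · intro k hk1 hk2
    rw [hall k hk1 hk2, hgv k hk1 hk2]
  · intro p hp1 hp2
    rw [hgv p hp1 (by omega), hgv (2 * p) (by omega) (by omega), hgv (2 * p + 1) (by omega) (by omega)]
    ring
  · intro j hj
    rw [hgv (nn + j) (by omega) (by omega)]

def cmSum (cm : Nat → Int) : Nat → Int
  | 0 => 0
  | x + 1 => cmSum cm x + cm x

def CntInv (mLen : Nat) (cnt : List Int) (cm : Nat → Int) : Prop :=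
  cnt.length = mLen ∧ ∀ j : Nat, j < mLen → cnt.getD j 0 = cm j

theorem getD_set_int (t : List Int) (i j : Nat) (v : Int) :
    (t.set i v).getD j 0 = if i = j ∧ i < t.length then v else t.getD j 0 := by
  simp only [List.getD_eq_getElem?_getD, List.getElem?_set]
  by_cases h : i = j
  · subst h
    by_cases hlen : i < t.length <;> simp [hlen]
  · simp [h]

theorem CntInv_set (mLen : Nat) (cnt : List Int) (cm : Nat → Int) (x : Nat)
    (h : CntInv mLen cnt cm) (hx : x < mLen) :
    CntInv mLen (cnt.set x (cnt.getD x 0 + 1)) (fun j => cm j + if j = x then 1 else 0) := by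
  obtain ⟨hlen, hval⟩ := h
  refine ⟨by simp [hlen], ?_⟩
  intro j hj
  rw [getD_set_int]
  by_cases hjx : x = j
  · subst hjx
    rw [if_pos ⟨rfl, by omega⟩, hval x hj]
    simp
  · rw [if_neg (by omega)]
    rw [hval j hj]
    simp [Ne.symm hjx]

theorem cnt_take_sum (mLen : Nat) (cnt : List Int) (cm : Nat → Int)
    (h : CntInv mLen cnt cm) : ∀ x : Nat, x ≤ mLen → (cnt.take x).sum = cmSum cm x := by
  obtain ⟨hlen, hval⟩ := h
  intro x
  induction x with
  | zero => intro _; simp [cmSum]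
  | succ x ih =>
    intro hx
    have hlt : x < cnt.length := by omega
    rw [List.sum_take_succ _ _ hlt, ih (by omega)]
    rw [cmSum]
    congr 1
    rw [← hval x (by omega), List.getD_eq_getElem _ _ hlt]

theorem sumG_leaves (nn : Nat) (t : List (Option Int)) (cm : Nat → Int)
    (hleaf : ∀ j : Nat, j < nn → gv t (nn + j) = cm j) :
    ∀ x : Nat, 1 ≤ x → x ≤ nn → sumG t nn (nn + x - 1) = cmSum cm x := by
  intro x
  induction x with
  | zero => intro h; omega
  | succ x ih =>
    intro _ hx
    by_cases hx0 : x = 0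
    · subst hx0
      have e : nn + 1 - 1 = nn := by omega
      rw [e, sumG, dif_pos (le_refl nn), sumG_nil t (nn + 1) nn (by omega)]
      have h0 := hleaf 0 (by omega)
      rw [Nat.add_zero] at h0
      rw [h0]
      simp [cmSum]
    · have e1 : nn + (x + 1) - 1 = (nn + x - 1) + 1 := by omega
      have e2 : (nn + x - 1) + 1 = nn + x := by omega
      rw [e1, sumG_succ_top t nn (nn + x - 1) (by omega), ih (by omega) (by omega), e2,
          hleaf x (by omega)]
      rfl

theorem main_fold (m : Int) (hm : 1 ≤ m) :
    ∀ (rest : List Int) (i : Int) (tA : List (Option Int)) (cnt : List Int) (s : Int)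
      (cm : Nat → Int),
    SegInv (m + 2).toNat tA cm → CntInv (m + 1).toNat cnt cm →
    (∀ x ∈ rest, 1 ≤ x ∧ x ≤ m) →
    ((PySem.List.enumerate rest i).foldl
      (fun (st : List (Option Int) × Int) p =>
        let q1 := pvSegQuery st.1 (((m + 2).toNat : Nat) : Int)
          ((((m + 2).toNat : Nat) : Int) + p.2 - 1) none
        let q2 := pvSegQuery st.1 (((m + 2).toNat : Nat) : Int)
          ((((m + 2).toNat : Nat) : Int) + p.2) none
        (pvSegUpdate st.1 ((((m + 2).toNat : Nat) : Int) + p.2) 1,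
          st.2 + min (q1.getD 0) (p.1 - q2.getD 0)))
      (tA, s)).2 =
    ((PySem.List.enumerate rest i).foldl
      (fun (st : List Int × Int) p =>
        let less := (PySem.List.slice st.1 none (some p.2)).sum
        let greater := p.1 - less - PySem.List.pyGetD st.1 p.2 0
        (st.1.set p.2.toNat (PySem.List.pyGetD st.1 p.2 0 + 1), st.2 + min less greater))
      (cnt, s)).2 := by
  intro rest
  induction rest with
  | nil =>
    intro i tA cnt s cm _ _ _
    simp [PySem.List.enumerate_nil]
  | cons x rest ih =>
    intro i tA cnt s cm hSeg hCnt hall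
    obtain ⟨hx1, hxm⟩ := hall x (by simp)
    have hrest : ∀ y ∈ rest, 1 ≤ y ∧ y ≤ m := fun y hy => hall y (by simp [hy])
    rw [PySem.List.enumerate_cons, List.foldl_cons, List.foldl_cons]
    dsimp only
    set nn : Nat := (m + 2).toNat with hnn
    have hnnc : ((nn : Nat) : Int) = m + 2 := by omega
    have hxt : ((x.toNat : Nat) : Int) = x := by omega
    have hxnn : x.toNat < nn := by omega
    have hxnn2 : x.toNat + 1 ≤ nn := by omega
    obtain ⟨hlen, hs, hrec, hleaf⟩ := hSeg
    -- A's first query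
    have hq1 := pvSegQuery_eq tA nn hs hrec
      (((nn : Int) + x - 1 - (nn : Int) + 1).toNat) (nn : Int) ((nn : Int) + x - 1) none
      le_rfl (by omega) (by omega) (by omega)
    have hr1 : ((nn : Int) + x - 1).toNat = nn + x.toNat - 1 := by omega
    have hl1 : ((nn : Int) : Int).toNat = nn := by omega
    rw [hr1, hl1, sumG_leaves nn tA cm hleaf x.toNat (by omega) (by omega)] at hq1
    -- A's second query
    have hq2 := pvSegQuery_eq tA nn hs hrec
      (((nn : Int) + x - (nn : Int) + 1).toNat) (nn : Int) ((nn : Int) + x) none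
      le_rfl (by omega) (by omega) (by omega)
    have hr2 : ((nn : Int) + x).toNat = nn + (x.toNat + 1) - 1 := by omega
    rw [hr2, hl1, sumG_leaves nn tA cm hleaf (x.toNat + 1) (by omega) hxnn2] at hq2
    -- B's slice sum and element
    have hless : (PySem.List.slice cnt none (some x)).sum = cmSum cm x.toNat := by
      rw [PySem.List.slice_to cnt (by omega : (0:Int) ≤ x)]
      exact cnt_take_sum (m + 1).toNat cnt cm hCnt x.toNat (by omega)
    have hget : PySem.List.pyGetD cnt x 0 = cm x.toNat := by
      rw [PySem.List.pyGetD_eq_getElem cnt 0 (by omega) (by rw [hCnt.1]; omega)]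
      rw [← List.getD_eq_getElem _ _ (by rw [hCnt.1]; omega)]
      exact hCnt.2 x.toNat (by omega)
    rw [hq1, hq2, hless, hget]
    have hsum_eq : s + min ((none : Option Int).getD 0 + cmSum cm x.toNat)
        (i - ((none : Option Int).getD 0 + cmSum cm (x.toNat + 1)))
        = s + min (cmSum cm x.toNat) (i - cmSum cm x.toNat - cm x.toNat) := by
      simp only [Option.getD_none, zero_add, cmSum]
      congr 2
      ring
    have hupdA : pvSegUpdate tA ((nn : Int) + x) 1
        = pvSegUpdate tA ((nn : Int) + (x.toNat : Int)) 1 := by rw [hxt]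
    have hSeg' := SegInv_update nn tA cm x.toNat ⟨hlen, hs, hrec, hleaf⟩ hxnn
    have hCnt' := CntInv_set (m + 1).toNat cnt cm x.toNat hCnt (by omega)
    have hgetD : cm x.toNat + 1 = cnt.getD x.toNat 0 + 1 := by
      rw [hCnt.2 x.toNat (by omega)]
    rw [hupdA, hgetD]
    simp only [Option.getD_some]
    rw [hsum_eq]
    exact ih (i + 1) (pvSegUpdate tA ((nn : Int) + (x.toNat : Int)) 1)
      (cnt.set x.toNat (cnt.getD x.toNat 0 + 1))
      (s + min (cmSum cm x.toNat) (i - cmSum cm x.toNat - cm x.toNat))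
      (fun j => cm j + if j = x.toNat then 1 else 0) hSeg' hCnt' hrest

theorem final_eq (instructions : List Int) (hne : instructions ≠ [])
    (hpos : ∀ x ∈ instructions, 1 ≤ x) :
    createSortedArray instructions = createSortedArray_alt instructions := by
  cases hmax : PySem.List.max? instructions (fun x => x) with
  | none => exact absurd ((PySem.List.max?_eq_none_iff _ _).mp hmax) hne
  | some m =>
    have hm1 : 1 ≤ m := hpos m (PySem.List.max?_mem hmax)
    have hbnd : ∀ x ∈ instructions, 1 ≤ x ∧ x ≤ m := fun x hx =>
      ⟨hpos x hx, PySem.List.max?_isMax hmax x hx⟩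
    unfold createSortedArray createSortedArray_alt
    rw [hmax]
    dsimp only
    congr 1
    have hinit := SegInv_init (m + 2).toNat (by omega)
    have hcnt0 : CntInv (m + 1).toNat (List.replicate (m + 1).toNat (0 : Int)) (fun _ => 0) := by
      refine ⟨by simp, ?_⟩
      intro j hj
      simp [List.getD_eq_getElem?_getD, List.getElem?_replicate, hj]
    exact main_fold m hm1 instructions 0 _ _ 0 (fun _ => 0) hinit hcnt0 hbnd

-- ===== VERDICT (by name: the statement is the Claim_ definition above) =====
theorem createSortedArray_spec : Claim_equal_createSortedArray := by
  intro instructions _ hpre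
  unfold Spec_createSortedArray
  exact final_eq instructions hpre.1 hpre.2
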